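-- pv_equiv track=rewrite | github.com/aria1th/Torus-Hamilton-Decomposition | scripts/d5_239_G1_reduced_omit_target_search.py | first_return_on_row_zero
-- ===== SOURCE A (Python) =====
-- from dataclasses import dataclass
-- from typing import Callable, Dict, Iterable, List, Optional, Sequence, Tuple
--
-- State2 = Tuple[int, int]
--
-- @dataclass(frozen=True)
-- class ReducedFamilySpec:
--     m: int
--     a: int          # slope: +1 or -1
--     b: int          # intercept
--     defect_row: int
--     defect_h: Optional[int]  # None = omission; otherwise swap defect_h <-> defect_h+1 on defect row
--
-- def reduced_base_map(spec: ReducedFamilySpec) -> Callable[[State2], State2]: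
--     m = spec.m
--     a = spec.a
--     b = spec.b
--     d = spec.defect_row
--     h = spec.defect_h
--
--     def step(state: State2) -> State2:
--         s, u = state
--         g = (a * s + b) % m
--         if s == d:
--             if h is None:
--                 u2 = u
--             else:
--                 h0 = h % m
--                 h1 = (h0 + 1) % m
--                 if u == h0:
--                     u2 = h1
--                 elif u == h1:
--                     u2 = h0
--                 else:
--                     u2 = u
--         else:
--             g1 = (g + 1) % m
--             if u == g:
--                 u2 = g1
--             elif u == g1:
--                 u2 = g
--             else:
--                 u2 = u
--         return ((s + 1) % m, u2)
--
--     return step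
--
-- def first_return_on_row_zero(m: int, defect_h: Optional[int]) -> Dict[int, int]:
--     spec = ReducedFamilySpec(m=m, a=1, b=0, defect_row=0, defect_h=defect_h)
--     step = reduced_base_map(spec)
--     out: Dict[int, int] = {}
--     for u0 in range(m):
--         state = (0, u0)
--         for _ in range(m):
--             state = step(state)
--         out[u0] = state[1]
--     return out
-- ===== SOURCE B (Python) =====
-- def first_return_on_row_zero(m, defect_h):
--     # After the defect-row swap (if any), the remaining m-1 transpositions
--     # (s, s+1 mod m) compose to the rotation u -> (u - 1) mod m.
--     out = {}
--     for u0 in range(m):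
--         u = u0
--         if defect_h is not None:
--             h0 = defect_h % m
--             h1 = (h0 + 1) % m
--             if u == h0:
--                 u = h1
--             elif u == h1:
--                 u = h0
--         out[u0] = (u - 1) % m
--     return out
-- ===== Notes on version B (the rewrite author's own statement) =====
-- stated objective: faster
-- what changed: B replaces A's inner loop of m simulated transposition steps per start value by the closed form: the m-1 non-defect transpositions (s, s+1 mod m) compose to the rotation u -> (u-1) mod m, so B applies the single defect-row swap and then that rotation directly.
import Mathlib
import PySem

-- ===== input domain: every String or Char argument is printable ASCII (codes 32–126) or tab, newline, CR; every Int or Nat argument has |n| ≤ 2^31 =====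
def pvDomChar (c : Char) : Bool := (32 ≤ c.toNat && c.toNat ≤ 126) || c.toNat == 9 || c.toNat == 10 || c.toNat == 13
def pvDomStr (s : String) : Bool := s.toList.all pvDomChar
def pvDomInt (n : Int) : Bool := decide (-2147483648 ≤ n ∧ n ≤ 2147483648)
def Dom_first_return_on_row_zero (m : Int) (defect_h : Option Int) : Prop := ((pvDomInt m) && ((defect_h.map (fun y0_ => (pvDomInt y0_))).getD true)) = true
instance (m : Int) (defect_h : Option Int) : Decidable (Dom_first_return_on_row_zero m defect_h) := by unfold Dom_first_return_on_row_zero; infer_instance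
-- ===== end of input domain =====

-- B replaces A's per-start inner loop of m transposition steps by the closed-form
-- rotation (u-1) mod m after the single defect-row swap (objective: faster, O(m) vs O(m^2)).


-- ===== PORT A =====
-- step of reduced_base_map with spec m, a=1, b=0, defect_row=0, defect_h
def pvStepA (m : Int) (h : Option Int) (state : Int × Int) : Int × Int :=
  let s := state.1
  let u := state.2
  let g := PySem.Int.mod (1 * s + 0) m
  let u2 :=
    if s = 0 then
      match h with
      | none => u
      | some hv =>
        let h0 := PySem.Int.mod hv m
        let h1 := PySem.Int.mod (h0 + 1) m
        if u = h0 then h1 else if u = h1 then h0 else u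
    else
      let g1 := PySem.Int.mod (g + 1) m
      if u = g then g1 else if u = g1 then g else u
  (PySem.Int.mod (s + 1) m, u2)

def first_return_on_row_zero (m : Int) (defect_h : Option Int) : List (Int × Int) :=
  ((PySem.List.pyRange 0 m 1).foldl (fun out u0 =>
      let state := (PySem.List.pyRange 0 m 1).foldl
        (fun state _ => pvStepA m defect_h state) (0, u0)
      out.insert u0 state.2)
    (PySem.Dict.empty : PySem.Dict Int Int)).items

-- ===== PORT B =====
def first_return_on_row_zero_alt (m : Int) (defect_h : Option Int) : List (Int × Int) :=
  ((PySem.List.pyRange 0 m 1).foldl (fun out u0 =>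
      let u :=
        match defect_h with
        | none => u0
        | some hv =>
          let h0 := PySem.Int.mod hv m
          let h1 := PySem.Int.mod (h0 + 1) m
          if u0 = h0 then h1 else if u0 = h1 then h0 else u0
      out.insert u0 (PySem.Int.mod (u - 1) m))
    (PySem.Dict.empty : PySem.Dict Int Int)).items

-- ===== PRECONDITION & SPEC =====
def Spec_first_return_on_row_zero (m : Int) (defect_h : Option Int) (out : List (Int × Int)) : Prop := out = first_return_on_row_zero_alt m defect_h
instance (m : Int) (defect_h : Option Int) (out : List (Int × Int)) : Decidable (Spec_first_return_on_row_zero m defect_h out) := by unfold Spec_first_return_on_row_zero; infer_instance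

-- ===== CLAIM (what is proved, stated in full; the proofs are below) =====
def Claim_equal_first_return_on_row_zero : Prop := ∀ (m : Int) (defect_h : Option Int), Dom_first_return_on_row_zero m defect_h → Spec_first_return_on_row_zero m defect_h (first_return_on_row_zero m defect_h)

-- ===== LEMMAS AND PROOFS =====

-- value of the remaining fold over steps s = k .. m-1, for 1 ≤ k ≤ m, 0 ≤ u < m
def pvExpected (m k u : Int) : Int :=
  if k = m then u
  else if u = 0 then m - 1
  else if u < k then u
  else if u = k then 0
  else u - 1

theorem pvNegOneEmod (m : Int) (hm : 0 < m) : (-1 : Int) % m = m - 1 := by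
  have h1 : ((-1 : Int) + m * 1) % m = (-1 : Int) % m := Int.add_mul_emod_self_left (-1) m 1
  have h2 : ((-1 : Int) + m * 1) = m - 1 := by ring
  rw [h2] at h1
  rw [← h1]
  exact Int.emod_eq_of_lt (by omega) (by omega)

theorem pvRoll (m : Int) (dh : Option Int) (hm : 0 < m) :
    ∀ (n : Nat) (k u : Int), m - k = n → 1 ≤ k → k ≤ m → 0 ≤ u → u < m →
    ((PySem.List.pyRange k m 1).foldl (fun st _ => pvStepA m dh st)
        (PySem.Int.mod k m, u)).2 = pvExpected m k u := by
  intro n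
  induction n with
  | zero =>
    intro k u hn hk1 hkm hu0 hum
    have hkm' : k = m := by omega
    rw [PySem.List.pyRange_one_eq_nil (by omega)]
    simp [pvExpected, hkm']
  | succ n ih =>
    intro k u hn hk1 hkm hu0 hum
    have hklt : k < m := by omega
    rw [PySem.List.pyRange_one_cons hklt]
    have hmodk : PySem.Int.mod k m = k := by
      rw [PySem.Int.mod_eq_emod_of_pos hm]
      exact Int.emod_eq_of_lt (by omega) (by omega)
    have hmodk1 : PySem.Int.mod (k + 1) m = if k + 1 = m then 0 else k + 1 := by
      rw [PySem.Int.mod_eq_emod_of_pos hm]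
      split_ifs with h
      · rw [h]; exact Int.emod_self
      · exact Int.emod_eq_of_lt (by omega) (by omega)
    have hstep : pvStepA m dh (PySem.Int.mod k m, u) =
        (PySem.Int.mod (k + 1) m,
          if u = k then (if k + 1 = m then 0 else k + 1)
          else if u = (if k + 1 = m then 0 else k + 1) then k else u) := by
      have hk0 : ¬ (k = 0) := by omega
      simp only [pvStepA, hmodk, one_mul, add_zero]
      rw [if_neg hk0, hmodk1]
    simp only [List.foldl_cons]
    rw [hstep]
    have hu2b : 0 ≤ (if u = k then (if k + 1 = m then 0 else k + 1)
          else if u = (if k + 1 = m then 0 else k + 1) then k else u) ∧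
        (if u = k then (if k + 1 = m then 0 else k + 1)
          else if u = (if k + 1 = m then 0 else k + 1) then k else u) < m := by
      split_ifs <;> omega
    rw [ih (k + 1) _ (by omega) (by omega) (by omega) hu2b.1 hu2b.2]
    simp only [pvExpected]
    split_ifs <;> omega

-- the full inner loop of A: defect step at s = 0, then the rotation by -1
theorem pvInner (m : Int) (dh : Option Int) (hm : 0 < m) (u0 : Int)
    (hu0 : 0 ≤ u0) (hum : u0 < m) :
    ((PySem.List.pyRange 0 m 1).foldl (fun st _ => pvStepA m dh st) (0, u0)).2 =
      PySem.Int.mod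
        ((match dh with
          | none => u0
          | some hv =>
            let h0 := PySem.Int.mod hv m
            let h1 := PySem.Int.mod (h0 + 1) m
            if u0 = h0 then h1 else if u0 = h1 then h0 else u0) - 1) m := by
  rw [PySem.List.pyRange_one_cons hm]
  simp only [List.foldl_cons]
  set w : Int := (match dh with
    | none => u0
    | some hv =>
      let h0 := PySem.Int.mod hv m
      let h1 := PySem.Int.mod (h0 + 1) m
      if u0 = h0 then h1 else if u0 = h1 then h0 else u0) with hw
  have hstep0 : pvStepA m dh (0, u0) = (PySem.Int.mod 1 m, w) := by
    simp only [pvStepA, hw]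
    simp
  have hwb : 0 ≤ w ∧ w < m := by
    rw [hw]
    cases dh with
    | none => exact ⟨hu0, hum⟩
    | some hv =>
      have b0 := PySem.Int.mod_nonneg hv hm
      have b1 := PySem.Int.mod_lt hv hm
      have c0 := PySem.Int.mod_nonneg (PySem.Int.mod hv m + 1) hm
      have c1 := PySem.Int.mod_lt (PySem.Int.mod hv m + 1) hm
      simp only []
      split_ifs <;> omega
  rw [hstep0]
  by_cases hm1 : m = 1
  · rw [PySem.List.pyRange_one_eq_nil (by omega)]
    simp only [List.foldl_nil]
    rw [PySem.Int.mod_eq_emod_of_pos hm, hm1, Int.emod_one]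
    omega
  · have h1 : PySem.Int.mod 1 m = 1 := by
      rw [PySem.Int.mod_eq_emod_of_pos hm]
      exact Int.emod_eq_of_lt (by omega) (by omega)
    rw [h1]
    have hr := pvRoll m dh hm (m - 1).toNat 1 w (by omega) (by omega) (by omega) hwb.1 hwb.2
    rw [h1] at hr
    rw [show (0 : Int) + 1 = 1 by norm_num, hr]
    rw [PySem.Int.mod_eq_emod_of_pos hm]
    by_cases hw0 : w = 0
    · simp only [pvExpected, hw0]
      rw [show (0 : Int) - 1 = -1 by ring, pvNegOneEmod m hm]
      split_ifs <;> omega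
    · have he : (w - 1) % m = w - 1 := Int.emod_eq_of_lt (by omega) (by omega)
      simp only [pvExpected]
      split_ifs <;> omega

-- ===== VERDICT (by name: the statement is the Claim_ definition above) =====
theorem first_return_on_row_zero_spec : Claim_equal_first_return_on_row_zero := by
  intro m defect_h _
  unfold Spec_first_return_on_row_zero
  unfold first_return_on_row_zero first_return_on_row_zero_alt
  refine congrArg PySem.Dict.items ?_
  refine PySem.List.foldl_congr_mem _ _ _ _ ?_
  intro out u0 hmem
  have hb := (PySem.List.mem_pyRange_one).1 hmem
  have hm : 0 < m := by omega
  simp only []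
  rw [pvInner m defect_h hm u0 hb.1 hb.2]
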